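-- pv_equiv track=rewrite | github.com/hitbox/scratch | pygame/pygamelib.py | reflow_from
-- ===== SOURCE A (Python) =====
-- def reflow_from(list_, item):
--     """
--     Loop through list_, find item, and then from there yield it, yield the
--     remaining, and finally the item before it in list_ order.
--     """
--     list_iter = iter(list_)
--     stack = []
--     for thing in list_iter:
--         if thing == item:
--             yield thing
--             break
--         else:
--             stack.append(thing)
--     for thing in list_iter:
--         yield thing
--     for thing in stack:
--         yield thing
-- ===== SOURCE B (Python) =====
-- def reflow_from(list_, item):
--     seq = list(list_)
--     try:
--         i = seq.index(item)
--     except ValueError: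
--         i = len(seq)
--     yield from seq[i:]
--     yield from seq[:i]
-- ===== Notes on version B (the rewrite author's own statement) =====
-- stated objective: simpler
-- what changed: Replace the three explicit iterator/stack loops with a single index lookup followed by two slices (rotate at the pivot); not-found falls out as i = len(seq).
import Mathlib
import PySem

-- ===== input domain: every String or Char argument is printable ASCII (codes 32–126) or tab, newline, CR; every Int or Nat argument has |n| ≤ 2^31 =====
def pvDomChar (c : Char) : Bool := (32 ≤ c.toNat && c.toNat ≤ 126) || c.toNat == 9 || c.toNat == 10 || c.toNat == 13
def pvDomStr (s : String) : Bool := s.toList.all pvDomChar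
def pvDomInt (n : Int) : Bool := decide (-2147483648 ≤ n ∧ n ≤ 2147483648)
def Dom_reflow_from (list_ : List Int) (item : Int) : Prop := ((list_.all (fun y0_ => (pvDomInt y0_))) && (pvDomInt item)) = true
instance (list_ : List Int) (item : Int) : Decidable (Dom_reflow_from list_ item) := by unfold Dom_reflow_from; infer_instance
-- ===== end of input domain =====

-- B replaces A's three iterator/stack loops by one index lookup and two slices (simpler decomposition).

-- ===== PORT A =====
-- first loop: consume until item (yielding it), pushing earlier things on `stack`;
-- then yield the rest of the iterator, then the stack.
def reflowGoA (item : Int) : List Int → List Int → List Int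
  | [], stack => stack
  | t :: rest, stack =>
      if t = item then (t :: rest) ++ stack else reflowGoA item rest (stack ++ [t])

def reflow_from (list_ : List Int) (item : Int) : List Int :=
  reflowGoA item list_ []

-- ===== PORT B =====
def reflow_from_alt (list_ : List Int) (item : Int) : List Int :=
  let i : Nat :=
    match PySem.List.index? list_ item with
    | some i => i
    | none => list_.length
  PySem.List.slice list_ (some (i : Int)) none ++ PySem.List.slice list_ none (some (i : Int))

-- ===== PRECONDITION & SPEC =====
def Spec_reflow_from (list_ : List Int) (item : Int) (out : List Int) : Prop := out = reflow_from_alt list_ item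
instance (list_ : List Int) (item : Int) (out : List Int) : Decidable (Spec_reflow_from list_ item out) := by unfold Spec_reflow_from; infer_instance

-- ===== CLAIM (what is proved, stated in full; the proofs are below) =====
def Claim_equal_reflow_from : Prop := ∀ (list_ : List Int) (item : Int), Dom_reflow_from list_ item → Spec_reflow_from list_ item (reflow_from list_ item)

-- ===== LEMMAS AND PROOFS =====

theorem reflowGoA_eq (item : Int) :
    ∀ (l stack : List Int),
      reflowGoA item l stack =
        match PySem.List.index? l item with
        | some i => l.drop i ++ stack ++ l.take i
        | none => stack ++ l := by
  intro l
  induction l with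
  | nil => intro stack; simp [reflowGoA, PySem.List.index?]
  | cons t rest ih =>
    intro stack
    by_cases h : t = item
    · subst h
      rw [PySem.List.index?_cons_self]
      simp [reflowGoA]
    · have hne : t ≠ item := h
      rw [PySem.List.index?_cons_of_ne (h := hne)]
      simp only [reflowGoA, if_neg h, ih]
      cases hidx : PySem.List.index? rest item with
      | none => simp
      | some i => simp

theorem reflow_from_spec : Claim_equal_reflow_from := by
  intro list_ item _
  unfold Spec_reflow_from reflow_from reflow_from_alt
  rw [reflowGoA_eq]
  cases hidx : PySem.List.index? list_ item with
  | none =>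
    simp [PySem.List.slice_from_natCast, PySem.List.slice_to_natCast]
  | some i =>
    simp [PySem.List.slice_from_natCast, PySem.List.slice_to_natCast]
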